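-- pv_equiv track=rewrite | github.com/tom0930/AutoAgent-TW | scripts/git_precommit_hook.py | get_categorized_manifest
-- ===== SOURCE A (Python) =====
-- def get_categorized_manifest(files):
--     """
--     將檔案按照目錄分類，產生人類可讀的 Manifest
--     """
--     categories = {
--         "🛠️ Logic": [],
--         "🎨 UI/Dashboard": [],
--         "🧪 Tests/Diag": [],
--         "📝 Docs": [],
--         "⚙️ Config": [],
--         "📦 Other": []
--     }
--
--     for f in files:
--         if "scripts" in f or ".py" in f:
--             if "test" in f or "debug" in f: categories["🧪 Tests/Diag"].append(f)
--             else: categories["🛠️ Logic"].append(f)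
--         elif "templates" in f or "status.html" in f or ".js" in f:
--             categories["🎨 UI/Dashboard"].append(f)
--         elif ".md" in f:
--             categories["📝 Docs"].append(f)
--         elif ".json" in f or "config" in f:
--             categories["⚙️ Config"].append(f)
--         else:
--             categories["📦 Other"].append(f)
--
--     manifest = ""
--     for cat, items in categories.items():
--         if items:
--             manifest += f"\n  {cat}:\n"
--             for item in items:
--                 manifest += f"    - {item}\n"
--     return manifest
-- ===== SOURCE B (Python) =====
-- LABELS = ["🛠️ Logic", "🎨 UI/Dashboard", "🧪 Tests/Diag", "📝 Docs", "⚙️ Config", "📦 Other"]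
--
-- def _classify(f):
--     if "scripts" in f or ".py" in f:
--         return "🧪 Tests/Diag" if ("test" in f or "debug" in f) else "🛠️ Logic"
--     if "templates" in f or "status.html" in f or ".js" in f:
--         return "🎨 UI/Dashboard"
--     if ".md" in f:
--         return "📝 Docs"
--     if ".json" in f or "config" in f:
--         return "⚙️ Config"
--     return "📦 Other"
--
-- def get_categorized_manifest(files):
--     parts = []
--     for cat in LABELS:
--         items = [f for f in files if _classify(f) == cat]
--         if items:
--             parts.append(f"\n  {cat}:\n")
--             parts.extend(f"    - {item}\n" for item in items)
--     return "".join(parts)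
-- ===== Notes on version B (the rewrite author's own statement) =====
-- stated objective: idiomatic
-- what changed: A makes one pass over files appending into six pre-built dict buckets and then concatenates the manifest; B instead has a pure classifier function and, for each label in order, filters the file list and joins the section strings, with no mutable bucket dict.
import Mathlib
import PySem

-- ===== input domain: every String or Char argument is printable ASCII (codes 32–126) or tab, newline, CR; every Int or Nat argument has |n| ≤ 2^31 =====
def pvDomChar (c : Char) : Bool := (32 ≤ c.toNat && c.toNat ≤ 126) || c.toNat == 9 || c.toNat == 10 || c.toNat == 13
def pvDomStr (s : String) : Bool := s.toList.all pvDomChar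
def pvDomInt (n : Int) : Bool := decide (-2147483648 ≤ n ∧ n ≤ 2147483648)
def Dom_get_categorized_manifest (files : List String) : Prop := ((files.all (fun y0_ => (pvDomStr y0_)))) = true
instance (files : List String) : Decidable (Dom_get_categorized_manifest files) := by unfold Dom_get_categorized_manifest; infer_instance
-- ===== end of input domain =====

-- B replaces A's mutable six-bucket dict with a pure classifier and per-label filters (idiomatic, same cost).

-- ===== PORT A =====
-- A's fixed-key dict of six lists, as a record (one field per key, same order).
structure PvCats where
  logic : List String
  ui : List String
  tests : List String
  docs : List String
  config : List String
  other : List String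
deriving Repr, DecidableEq

-- one iteration of A's classification loop (same branch order, `in` = PySem.Str.isIn)
def pvStepA (c : PvCats) (f : String) : PvCats :=
  if PySem.Str.isIn "scripts" f || PySem.Str.isIn ".py" f then
    if PySem.Str.isIn "test" f || PySem.Str.isIn "debug" f then { c with tests := c.tests ++ [f] }
    else { c with logic := c.logic ++ [f] }
  else if PySem.Str.isIn "templates" f || PySem.Str.isIn "status.html" f || PySem.Str.isIn ".js" f then
    { c with ui := c.ui ++ [f] }
  else if PySem.Str.isIn ".md" f then { c with docs := c.docs ++ [f] }
  else if PySem.Str.isIn ".json" f || PySem.Str.isIn "config" f then { c with config := c.config ++ [f] }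
  else { c with other := c.other ++ [f] }

-- A's manifest loop body for one (cat, items) entry: skip if empty, else append header then items
def pvEmitA (m : String) (cat : String) (items : List String) : String :=
  if items.isEmpty then m
  else items.foldl (fun m item => m ++ "    - " ++ item ++ "\n") (m ++ "\n  " ++ cat ++ ":\n")

def get_categorized_manifest (files : List String) : String :=
  let cats := files.foldl pvStepA ⟨[], [], [], [], [], []⟩
  pvEmitA (pvEmitA (pvEmitA (pvEmitA (pvEmitA (pvEmitA "" "🛠️ Logic" cats.logic)
    "🎨 UI/Dashboard" cats.ui) "🧪 Tests/Diag" cats.tests) "📝 Docs" cats.docs)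
    "⚙️ Config" cats.config) "📦 Other" cats.other

-- ===== PORT B =====
def pvLabels : List String :=
  ["🛠️ Logic", "🎨 UI/Dashboard", "🧪 Tests/Diag", "📝 Docs", "⚙️ Config", "📦 Other"]

def pvClassify (f : String) : String :=
  if PySem.Str.isIn "scripts" f || PySem.Str.isIn ".py" f then
    if PySem.Str.isIn "test" f || PySem.Str.isIn "debug" f then "🧪 Tests/Diag" else "🛠️ Logic"
  else if PySem.Str.isIn "templates" f || PySem.Str.isIn "status.html" f || PySem.Str.isIn ".js" f then
    "🎨 UI/Dashboard"
  else if PySem.Str.isIn ".md" f then "📝 Docs"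
  else if PySem.Str.isIn ".json" f || PySem.Str.isIn "config" f then "⚙️ Config"
  else "📦 Other"

-- the section string B contributes for one label
def pvSectionB (files : List String) (cat : String) : String :=
  let items := files.filter (fun f => pvClassify f == cat)
  if items.isEmpty then ""
  else "\n  " ++ cat ++ ":\n" ++ String.join (items.map (fun item => "    - " ++ item ++ "\n"))

def get_categorized_manifest_alt (files : List String) : String :=
  String.join (pvLabels.map (pvSectionB files))

-- ===== PRECONDITION & SPEC =====
def Spec_get_categorized_manifest (files : List String) (out : String) : Prop := out = get_categorized_manifest_alt files
instance (files : List String) (out : String) : Decidable (Spec_get_categorized_manifest files out) := by unfold Spec_get_categorized_manifest; infer_instance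

-- ===== CLAIM (what is proved, stated in full; the proofs are below) =====
def Claim_equal_get_categorized_manifest : Prop := ∀ (files : List String), Dom_get_categorized_manifest files → Spec_get_categorized_manifest files (get_categorized_manifest files)

-- ===== LEMMAS AND PROOFS =====

-- one classification step of A, expressed through B's classifier, field by field
theorem pvStepA_logic (s : PvCats) (f : String) :
    (pvStepA s f).logic = s.logic ++ (if pvClassify f == "🛠️ Logic" then [f] else []) := by
  unfold pvStepA pvClassify; split_ifs <;> simp_all

theorem pvStepA_ui (s : PvCats) (f : String) :
    (pvStepA s f).ui = s.ui ++ (if pvClassify f == "🎨 UI/Dashboard" then [f] else []) := by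
  unfold pvStepA pvClassify; split_ifs <;> simp_all

theorem pvStepA_tests (s : PvCats) (f : String) :
    (pvStepA s f).tests = s.tests ++ (if pvClassify f == "🧪 Tests/Diag" then [f] else []) := by
  unfold pvStepA pvClassify; split_ifs <;> simp_all

theorem pvStepA_docs (s : PvCats) (f : String) :
    (pvStepA s f).docs = s.docs ++ (if pvClassify f == "📝 Docs" then [f] else []) := by
  unfold pvStepA pvClassify; split_ifs <;> simp_all

theorem pvStepA_config (s : PvCats) (f : String) :
    (pvStepA s f).config = s.config ++ (if pvClassify f == "⚙️ Config" then [f] else []) := by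
  unfold pvStepA pvClassify; split_ifs <;> simp_all

theorem pvStepA_other (s : PvCats) (f : String) :
    (pvStepA s f).other = s.other ++ (if pvClassify f == "📦 Other" then [f] else []) := by
  unfold pvStepA pvClassify; split_ifs <;> simp_all

-- A's buckets are B's filters (field by field), generalized over the starting state.
theorem pvFoldA_fields (files : List String) (s : PvCats) :
    (files.foldl pvStepA s).logic = s.logic ++ files.filter (fun f => pvClassify f == "🛠️ Logic") ∧
    (files.foldl pvStepA s).ui = s.ui ++ files.filter (fun f => pvClassify f == "🎨 UI/Dashboard") ∧
    (files.foldl pvStepA s).tests = s.tests ++ files.filter (fun f => pvClassify f == "🧪 Tests/Diag") ∧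
    (files.foldl pvStepA s).docs = s.docs ++ files.filter (fun f => pvClassify f == "📝 Docs") ∧
    (files.foldl pvStepA s).config = s.config ++ files.filter (fun f => pvClassify f == "⚙️ Config") ∧
    (files.foldl pvStepA s).other = s.other ++ files.filter (fun f => pvClassify f == "📦 Other") := by
  induction files generalizing s with
  | nil => simp
  | cons f fs ih =>
    obtain ⟨h1, h2, h3, h4, h5, h6⟩ := ih (pvStepA s f)
    simp only [List.foldl_cons, List.filter_cons]
    refine ⟨?_, ?_, ?_, ?_, ?_, ?_⟩
    · rw [h1, pvStepA_logic]; split_ifs <;> simp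
    · rw [h2, pvStepA_ui]; split_ifs <;> simp
    · rw [h3, pvStepA_tests]; split_ifs <;> simp
    · rw [h4, pvStepA_docs]; split_ifs <;> simp
    · rw [h5, pvStepA_config]; split_ifs <;> simp
    · rw [h6, pvStepA_other]; split_ifs <;> simp

-- String.join utilities
theorem pvFoldl_str_acc (l : List String) (acc : String) :
    l.foldl (fun r s => r ++ s) acc = acc ++ l.foldl (fun r s => r ++ s) "" := by
  induction l generalizing acc with
  | nil => simp
  | cons x xs ih =>
    simp only [List.foldl_cons]
    rw [ih (acc ++ x), ih ("" ++ x)]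
    simp [String.append_assoc]

theorem pvJoin_cons (x : String) (xs : List String) :
    String.join (x :: xs) = x ++ String.join xs := by
  show List.foldl (fun r s => r ++ s) ("" ++ x) xs = _
  rw [pvFoldl_str_acc]
  simp [String.join]

-- A's inner concat loop writes m0 followed by the joined item lines
theorem pvFoldl_concat (items : List String) (m0 : String) :
    items.foldl (fun m item => m ++ "    - " ++ item ++ "\n") m0 =
      m0 ++ String.join (items.map (fun item => "    - " ++ item ++ "\n")) := by
  induction items generalizing m0 with
  | nil => simp [String.join]
  | cons i is ih =>
    simp only [List.foldl_cons, List.map_cons, pvJoin_cons]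
    rw [ih]
    simp [String.append_assoc]

-- one emit step of A = append B's section
theorem pvEmitA_eq (m cat : String) (items : List String) :
    pvEmitA m cat items =
      m ++ (if items.isEmpty then ""
            else "\n  " ++ cat ++ ":\n" ++ String.join (items.map (fun item => "    - " ++ item ++ "\n"))) := by
  unfold pvEmitA
  split_ifs with h
  · simp
  · rw [pvFoldl_concat]; simp [String.append_assoc]

-- ===== VERDICT (by name: the statement is the Claim_ definition above) =====
theorem get_categorized_manifest_spec : Claim_equal_get_categorized_manifest := by
  intro files _
  unfold Spec_get_categorized_manifest get_categorized_manifest get_categorized_manifest_alt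
  obtain ⟨h1, h2, h3, h4, h5, h6⟩ := pvFoldA_fields files ⟨[], [], [], [], [], []⟩
  simp only [h1, h2, h3, h4, h5, h6, List.nil_append]
  simp only [pvLabels, List.map, String.join, pvSectionB, pvEmitA_eq]
  simp [String.append_assoc]
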